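-- pv_equiv track=rewrite | github.com/johnsonzys/USACO | Comp/two/two.py | minimum_patches
-- ===== SOURCE A (Python) =====
-- def minimum_patches(n: int, k: int, cows: str) -> int:
--     # Initialize variables to keep track of the number of patches
--     # needed and the configuration
--     patches_needed = 0
--     configuration = []
--
--     # Iterate through the cows
--     for i, cow in enumerate(cows):
--         # If the current cow's breed is different from the previous cow's breed
--         # or if this is the first cow, we need to plant a patch
--         if i == 0 or cows[i - 1] != cow:
--             patches_needed += 1
--             configuration.append(cow)
--         # If the current cow's breed is the same as the previous cow's breed,
--         # we can use the previous patch
--         else: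
--             configuration.append('.')
--
--     # Return the results
--     return patches_needed, configuration
-- ===== SOURCE B (Python) =====
-- def minimum_patches(n: int, k: int, cows: str) -> int:
--     # Run-based scan: handle each maximal run of equal breeds at once.
--     patches_needed = 0
--     configuration = []
--     i, L = 0, len(cows)
--     while i < L:
--         j = i + 1
--         while j < L and cows[j] == cows[i]:
--             j += 1
--         patches_needed += 1
--         configuration.append(cows[i])
--         configuration.extend('.' * (j - i - 1))
--         i = j
--     return patches_needed, configuration
-- ===== Notes on version B (the rewrite author's own statement) =====
-- stated objective: alternative
-- what changed: B iterates over maximal runs of equal characters (inner while advances past each run, emitting the run's head and '.' fillers in bulk) instead of A's per-character comparison with the previous index.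
import Mathlib
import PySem

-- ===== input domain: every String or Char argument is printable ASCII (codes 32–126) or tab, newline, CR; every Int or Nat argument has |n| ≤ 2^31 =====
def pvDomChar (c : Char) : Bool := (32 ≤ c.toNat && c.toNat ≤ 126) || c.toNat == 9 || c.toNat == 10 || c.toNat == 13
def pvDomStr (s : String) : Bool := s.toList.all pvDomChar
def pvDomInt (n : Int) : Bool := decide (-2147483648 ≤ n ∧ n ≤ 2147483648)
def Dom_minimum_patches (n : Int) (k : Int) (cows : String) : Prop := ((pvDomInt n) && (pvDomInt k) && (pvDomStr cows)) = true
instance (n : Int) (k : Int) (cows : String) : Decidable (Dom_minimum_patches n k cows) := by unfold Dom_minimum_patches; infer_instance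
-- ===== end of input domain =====

-- B replaces A's per-character previous-index comparison by a run-based scan (alternative decomposition, same cost).
-- ===== PORT A =====
def minimum_patches (n : Int) (k : Int) (cows : String) : Int × List String :=
  (PySem.List.enumerate cows.toList 0).foldl
    (fun (st : Int × List String) ic =>
      if ic.1 = 0 ∨ PySem.List.pyGet? cows.toList (ic.1 - 1) ≠ some ic.2 then
        (st.1 + 1, st.2 ++ [String.singleton ic.2])
      else
        (st.1, st.2 ++ ["."]))
    (0, [])

-- ===== PORT B =====
-- the inner `while` of Source B: split off the maximal run of the head character
def groupRuns : List Char → List (Char × Nat)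
  | [] => []
  | c :: rest =>
    (c, (rest.takeWhile (· = c)).length + 1) :: groupRuns (rest.dropWhile (· = c))
  termination_by l => l.length
  decreasing_by
    simp only [List.length_cons]
    exact Nat.lt_succ_of_le (List.length_dropWhile_le _ _)

def minimum_patches_alt (n : Int) (k : Int) (cows : String) : Int × List String :=
  (groupRuns cows.toList).foldl
    (fun (st : Int × List String) run =>
      (st.1 + 1, st.2 ++ [String.singleton run.1] ++ List.replicate (run.2 - 1) "."))
    (0, [])

-- ===== PRECONDITION & SPEC =====
def Spec_minimum_patches (n : Int) (k : Int) (cows : String) (out : Int × List String) : Prop := out = minimum_patches_alt n k cows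
instance (n : Int) (k : Int) (cows : String) (out : Int × List String) : Decidable (Spec_minimum_patches n k cows out) := by unfold Spec_minimum_patches; infer_instance

-- ===== CLAIM (what is proved, stated in full; the proofs are below) =====
def Claim_equal_minimum_patches : Prop := ∀ (n : Int) (k : Int) (cows : String), Dom_minimum_patches n k cows → Spec_minimum_patches n k cows (minimum_patches n k cows)

-- ===== LEMMAS AND PROOFS =====

-- common recursive characterisation: process the list carrying the previous character
def pvSpecRun : Option Char → Int → List String → List Char → Int × List String
  | _, p, cfg, [] => (p, cfg)
  | prev, p, cfg, c :: rest =>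
    if prev ≠ some c then
      pvSpecRun (some c) (p + 1) (cfg ++ [String.singleton c]) rest
    else
      pvSpecRun (some c) p (cfg ++ ["."]) rest

theorem pvLast_lookup (pre rest : List Char) (h : pre ≠ []) :
    PySem.List.pyGet? (pre ++ rest) ((pre.length : Int) - 1) = pre.getLast? := by
  have h1 : 1 ≤ pre.length := List.length_pos_iff.mpr h
  have : ((pre.length : Int) - 1) = ((pre.length - 1 : Nat) : Int) := by omega
  rw [this, PySem.List.pyGet?_natCast]
  rw [List.getElem?_append_left (by omega)]
  rw [List.getLast?_eq_getElem?]

theorem pvA_spec (suf pre : List Char) (p : Int) (cfg : List String) :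
    (PySem.List.enumerate suf (pre.length : Int)).foldl
      (fun (st : Int × List String) ic =>
        if ic.1 = 0 ∨ PySem.List.pyGet? (pre ++ suf) (ic.1 - 1) ≠ some ic.2 then
          (st.1 + 1, st.2 ++ [String.singleton ic.2])
        else
          (st.1, st.2 ++ ["."]))
      (p, cfg)
    = pvSpecRun pre.getLast? p cfg suf := by
  induction suf generalizing pre p cfg with
  | nil => simp [PySem.List.enumerate_nil, pvSpecRun]
  | cons c rest ih =>
    rw [PySem.List.enumerate_cons, List.foldl_cons]
    rcases eq_or_ne pre [] with hpre | hpre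
    · subst hpre
      simp only [List.length_nil, Nat.cast_zero, List.nil_append, List.getLast?_nil]
      rw [if_pos (Or.inl trivial)]
      have h2 := ih [c] (p + 1) (cfg ++ [String.singleton c])
      simp only [List.length_cons, List.length_nil, List.getLast?_singleton] at h2
      push_cast at h2
      simp only [zero_add]
      simp only [pvSpecRun]
      rw [if_pos (by simp)]
      exact h2
    · have hne : ((pre.length : Int)) ≠ 0 := by
        have : 1 ≤ pre.length := List.length_pos_iff.mpr hpre
        omega
      have hlook : PySem.List.pyGet? (pre ++ c :: rest) ((pre.length : Int) - 1) = pre.getLast? :=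
        pvLast_lookup pre (c :: rest) hpre
      have hassoc : pre ++ c :: rest = (pre ++ [c]) ++ rest := by simp
      by_cases hprev : pre.getLast? = some c
      · have hcond : ¬ (((pre.length : Int)) = 0 ∨ PySem.List.pyGet? (pre ++ c :: rest) ((pre.length : Int) - 1) ≠ some c) := by
          refine not_or.mpr ⟨hne, ?_⟩
          rw [hlook]
          simpa using hprev
        rw [if_neg hcond]
        have h2 := ih (pre ++ [c]) p (cfg ++ ["."])
        simp only [List.length_append, List.length_cons, List.length_nil,
          List.getLast?_append_cons, List.getLast?_singleton] at h2
        push_cast at h2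
        rw [← hassoc] at h2
        simp only [pvSpecRun]
        rw [hprev, if_neg (by simp)]
        exact h2
      · have hcond : (((pre.length : Int)) = 0 ∨ PySem.List.pyGet? (pre ++ c :: rest) ((pre.length : Int) - 1) ≠ some c) := by
          right; rw [hlook]; exact hprev
        rw [if_pos hcond]
        have h2 := ih (pre ++ [c]) (p + 1) (cfg ++ [String.singleton c])
        simp only [List.length_append, List.length_cons, List.length_nil,
          List.getLast?_append_cons, List.getLast?_singleton] at h2
        push_cast at h2
        rw [← hassoc] at h2
        simp only [pvSpecRun]
        rw [if_pos hprev]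
        exact h2

theorem pvHead_dropWhile {α : Type} (p : α → Bool) (l : List α) (x : α)
    (h : (l.dropWhile p).head? = some x) : p x = false := by
  induction l with
  | nil => simp at h
  | cons a t ih =>
    rw [List.dropWhile_cons] at h
    by_cases hpa : p a = true
    · rw [if_pos hpa] at h; exact ih h
    · rw [if_neg hpa] at h
      simp only [List.head?_cons, Option.some.injEq] at h
      subst h
      simpa using hpa

theorem pvSpec_run_dots (t d : List Char) (c : Char) (ht : ∀ x ∈ t, x = c)
    (p : Int) (cfg : List String) :
    pvSpecRun (some c) p cfg (t ++ d) = pvSpecRun (some c) p (cfg ++ List.replicate t.length ".") d := by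
  induction t generalizing cfg with
  | nil => simp
  | cons a t' ih =>
    have ha : a = c := ht a (by simp)
    subst ha
    simp only [List.cons_append, pvSpecRun, ne_eq, not_true_eq_false]
    rw [if_neg (by simp)]
    rw [ih (fun x hx => ht x (by simp [hx])) (cfg ++ ["."])]
    congr 1
    simp [List.replicate_succ]

theorem pvB_spec (N : Nat) : ∀ (cs : List Char), cs.length ≤ N →
    ∀ (prev : Option Char) (p : Int) (cfg : List String),
    (∀ c, cs.head? = some c → prev ≠ some c) →
    (groupRuns cs).foldl
      (fun (st : Int × List String) run =>
        (st.1 + 1, st.2 ++ [String.singleton run.1] ++ List.replicate (run.2 - 1) "."))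
      (p, cfg)
    = pvSpecRun prev p cfg cs := by
  induction N with
  | zero =>
    intro cs h prev p cfg _
    have : cs = [] := List.length_eq_zero_iff.mp (Nat.le_zero.mp h)
    subst this
    simp [groupRuns, pvSpecRun]
  | succ N ih =>
    intro cs h prev p cfg hprev
    match cs with
    | [] => simp [groupRuns, pvSpecRun]
    | c :: rest =>
      rw [groupRuns, List.foldl_cons]
      have hp : prev ≠ some c := hprev c rfl
      have hsplit : rest = rest.takeWhile (· = c) ++ rest.dropWhile (· = c) :=
        (List.takeWhile_append_dropWhile).symm
      have hd : ∀ c', (rest.dropWhile (· = c)).head? = some c' → (some c : Option Char) ≠ some c' := by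
        intro c' hc' heq
        have hf := pvHead_dropWhile (· = c) rest c' hc'
        simp at hf heq
        exact hf heq.symm
      have hlen : (rest.dropWhile (· = c)).length ≤ N := by
        have h1 : (rest.dropWhile (· = c)).length ≤ rest.length := List.length_dropWhile_le _ _
        simp only [List.length_cons] at h
        omega
      rw [ih (rest.dropWhile (· = c)) hlen (some c) (p + 1)
        (cfg ++ [String.singleton c] ++ List.replicate ((rest.takeWhile (· = c)).length + 1 - 1) ".") hd]
      simp only [pvSpecRun]
      rw [if_pos hp]
      conv_rhs => rw [hsplit]
      rw [pvSpec_run_dots _ _ c (fun x hx => by simpa using (List.mem_takeWhile_imp hx))]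
      simp [List.append_assoc]

-- ===== VERDICT (by name: the statement is the Claim_ definition above) =====
theorem minimum_patches_spec : Claim_equal_minimum_patches := by
  intro n k cows _
  unfold Spec_minimum_patches minimum_patches minimum_patches_alt
  have hA := pvA_spec cows.toList [] 0 []
  simp only [List.length_nil, Nat.cast_zero, List.nil_append, List.getLast?_nil] at hA
  have hB := pvB_spec cows.toList.length cows.toList le_rfl none 0 [] (fun c _ => by simp)
  exact hA.trans hB.symm
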